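-- pv_equiv track=rewrite | github.com/benquick123/code-profiling | code/batch-1/vse-naloge-brez-testov/DN7-M-12.py | preberi_pot
-- ===== SOURCE A (Python) =====
-- def preberi_pot(ukazi):
--     x0,y0 = 0,0
--     pot = [(x0,y0)]
--     smer = "up"
--     for ukaz in ukazi.split("\n"):
--         if (ukaz == "LEVO" and smer == "right") or (ukaz == "DESNO" and smer == "left"):
--             smer = "up"
--             continue
--         if (ukaz == "LEVO" and smer == "left") or (ukaz == "DESNO" and smer == "right"):
--             smer = "down"
--             continue
--         if (ukaz == "LEVO" and smer == "down") or (ukaz == "DESNO" and smer == "up"):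
--             smer = "right"
--             continue
--         if (ukaz == "LEVO" and smer == "up") or (ukaz == "DESNO" and smer == "down"):
--             smer = "left"
--             continue
--         if ukaz != "LEVO" and ukaz != "DESNO" and smer == "right":
--             x0, y0 = (x0 + int(ukaz)), y0
--             pot.append((x0,y0))
--             continue
--         if ukaz != "LEVO" and ukaz != "DESNO" and smer == "left":
--             x0, y0 = (x0 - int(ukaz)), y0
--             pot.append((x0, y0))
--             continue
--         if ukaz != "LEVO" and ukaz != "DESNO" and smer == "down":
--             x0, y0 = x0, (y0 + int(ukaz))
--             pot.append((x0,y0))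
--             continue
--         if ukaz != "LEVO" and ukaz != "DESNO" and smer == "up":
--             x0, y0 = x0, (y0 - int(ukaz))
--             pot.append((x0,y0))
--             continue
--     return pot
--
--
--
--
--     """
--     Za podani seznam ukazov (glej navodila naloge) vrni pot.
--
--     Args:
--         ukazi (str): ukazi, napisani po vrsticah
--
--     Returns:
--         list of tuple of int: pot
--     """
-- ===== SOURCE B (Python) =====
-- def preberi_pot(ukazi):
--     # Stage 1: reduce the command stream to (heading index, distance) pairs,
--     # where heading = net right-turn count mod 4 (0=up, 1=right, 2=down, 3=left).
--     steps = []
--     t = 0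
--     for ukaz in ukazi.split("\n"):
--         if ukaz == "LEVO":
--             t -= 1
--         elif ukaz == "DESNO":
--             t += 1
--         else:
--             steps.append((t % 4, int(ukaz)))
--     # Stage 2: prefix-sum the displacement vectors given by a direction table.
--     DIRS = [(0, -1), (1, 0), (0, 1), (-1, 0)]
--     x, y = 0, 0
--     pot = [(x, y)]
--     for h, n in steps:
--         dx, dy = DIRS[h]
--         x, y = x + dx * n, y + dy * n
--         pot.append((x, y))
--     return pot
-- ===== Notes on version B (the rewrite author's own statement) =====
-- stated objective: alternative
-- what changed: Two staged passes instead of A's single-pass 8-branch state machine: pass 1 compresses the stream into (net-turn-count mod 4, distance) pairs with no position tracking, pass 2 prefix-sums displacements taken from a direction table.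
import Mathlib
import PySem

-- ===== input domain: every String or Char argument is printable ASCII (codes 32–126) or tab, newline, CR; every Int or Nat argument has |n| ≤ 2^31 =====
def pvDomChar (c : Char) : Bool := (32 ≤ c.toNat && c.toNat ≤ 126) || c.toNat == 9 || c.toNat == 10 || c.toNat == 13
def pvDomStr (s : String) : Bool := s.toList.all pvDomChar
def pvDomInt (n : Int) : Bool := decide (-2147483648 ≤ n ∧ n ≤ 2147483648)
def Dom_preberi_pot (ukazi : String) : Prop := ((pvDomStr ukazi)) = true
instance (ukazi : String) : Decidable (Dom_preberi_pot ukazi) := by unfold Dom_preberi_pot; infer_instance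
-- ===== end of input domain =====

-- B replaces A's single-pass 8-branch direction state machine by two staged passes: turn-count compression, then table-driven prefix sums; same return value.


-- ===== PORT A =====
-- A's loop: state (x0, y0, pot, smer) with smer a direction STRING, the if-chain in A's order.
-- int(ukaz) is (PySem.Int.ofStr? ukaz).getD 0; Pre_ guarantees isSome wherever it is consumed.
def pvALoop : List String → Int → Int → List (Int × Int) → String → List (Int × Int)
  | [], _, _, pot, _ => pot
  | ukaz :: rest, x0, y0, pot, smer =>
    if (ukaz = "LEVO" ∧ smer = "right") ∨ (ukaz = "DESNO" ∧ smer = "left") then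
      pvALoop rest x0 y0 pot "up"
    else if (ukaz = "LEVO" ∧ smer = "left") ∨ (ukaz = "DESNO" ∧ smer = "right") then
      pvALoop rest x0 y0 pot "down"
    else if (ukaz = "LEVO" ∧ smer = "down") ∨ (ukaz = "DESNO" ∧ smer = "up") then
      pvALoop rest x0 y0 pot "right"
    else if (ukaz = "LEVO" ∧ smer = "up") ∨ (ukaz = "DESNO" ∧ smer = "down") then
      pvALoop rest x0 y0 pot "left"
    else if ukaz ≠ "LEVO" ∧ ukaz ≠ "DESNO" ∧ smer = "right" then
      let x0' := x0 + (PySem.Int.ofStr? ukaz).getD 0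
      pvALoop rest x0' y0 (pot ++ [(x0', y0)]) smer
    else if ukaz ≠ "LEVO" ∧ ukaz ≠ "DESNO" ∧ smer = "left" then
      let x0' := x0 - (PySem.Int.ofStr? ukaz).getD 0
      pvALoop rest x0' y0 (pot ++ [(x0', y0)]) smer
    else if ukaz ≠ "LEVO" ∧ ukaz ≠ "DESNO" ∧ smer = "down" then
      let y0' := y0 + (PySem.Int.ofStr? ukaz).getD 0
      pvALoop rest x0 y0' (pot ++ [(x0, y0')]) smer
    else if ukaz ≠ "LEVO" ∧ ukaz ≠ "DESNO" ∧ smer = "up" then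
      let y0' := y0 - (PySem.Int.ofStr? ukaz).getD 0
      pvALoop rest x0 y0' (pot ++ [(x0, y0')]) smer
    else
      pvALoop rest x0 y0 pot smer

def preberi_pot (ukazi : String) : List (Int × Int) :=
  pvALoop ((PySem.Str.split? ukazi "\n").getD []) 0 0 [(0, 0)] "up"

-- ===== PORT B =====
-- B stage 1: compress the command stream into (net right-turn count mod 4, distance) pairs.
def pvStage1 : List String → Int → List (Int × Int)
  | [], _ => []
  | ukaz :: rest, t =>
    if ukaz = "LEVO" then pvStage1 rest (t - 1)
    else if ukaz = "DESNO" then pvStage1 rest (t + 1)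
    else (PySem.Int.mod t 4, (PySem.Int.ofStr? ukaz).getD 0) :: pvStage1 rest t

-- B's direction table DIRS = [(0,-1),(1,0),(0,1),(-1,0)]
def pvDirs : List (Int × Int) := [(0, -1), (1, 0), (0, 1), (-1, 0)]

-- B stage 2: prefix-sum the displacement vectors.
def pvStage2 : List (Int × Int) → Int → Int → List (Int × Int) → List (Int × Int)
  | [], _, _, pot => pot
  | (h, n) :: rest, x, y, pot =>
    let d := (PySem.List.pyGet? pvDirs h).getD (0, 0)
    pvStage2 rest (x + d.1 * n) (y + d.2 * n) (pot ++ [(x + d.1 * n, y + d.2 * n)])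

def preberi_pot_alt (ukazi : String) : List (Int × Int) :=
  pvStage2 (pvStage1 ((PySem.Str.split? ukazi "\n").getD []) 0) 0 0 [(0, 0)]

-- ===== PRECONDITION & SPEC =====
-- Pre_ excludes exactly the inputs on which Python A raises ValueError: a line that is neither a
-- turn command nor parseable by int() (e.g. a blank line, so the empty string is excluded).
def Pre_preberi_pot (ukazi : String) : Prop :=
  ∀ u ∈ (PySem.Str.split? ukazi "\n").getD [],
    u = "LEVO" ∨ u = "DESNO" ∨ (PySem.Int.ofStr? u).isSome = true
instance (ukazi : String) : Decidable (Pre_preberi_pot ukazi) := by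
  unfold Pre_preberi_pot; infer_instance
def pvWitness_preberi_pot : String := "2\nLEVO\n3"

def Spec_preberi_pot (ukazi : String) (out : List (Int × Int)) : Prop := out = preberi_pot_alt ukazi
instance (ukazi : String) (out : List (Int × Int)) : Decidable (Spec_preberi_pot ukazi out) := by unfold Spec_preberi_pot; infer_instance

-- ===== CLAIM (what is proved, stated in full; the proofs are below) =====
def Claim_equal_preberi_pot : Prop := ∀ (ukazi : String), Dom_preberi_pot ukazi → Pre_preberi_pot ukazi → Spec_preberi_pot ukazi (preberi_pot ukazi)

-- ===== LEMMAS AND PROOFS =====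
-- the direction string A carries when B's net turn count is t
def pvSmer (k : Int) : String :=
  if k = 0 then "up" else if k = 1 then "right" else if k = 2 then "down" else "left"

-- Invariant: A's single pass from direction pvSmer (t % 4) equals B's stage 2 run on stage 1's output.
lemma pvLoop_eq (ls : List String) : ∀ (t x y : Int) (pot : List (Int × Int)),
    pvALoop ls x y pot (pvSmer (PySem.Int.mod t 4)) = pvStage2 (pvStage1 ls t) x y pot := by
  induction ls with
  | nil => intro t x y pot; simp [pvALoop, pvStage1, pvStage2]
  | cons u rest ih =>
    intro t x y pot
    have hmod : ∀ s : Int, PySem.Int.mod s 4 = s % 4 :=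
      fun s => PySem.Int.mod_eq_emod_of_pos (by norm_num)
    have hm := PySem.Int.mod_nonneg t (b := 4) (by norm_num)
    have hlt := PySem.Int.mod_lt t (b := 4) (by norm_num)
    have h4 : PySem.Int.mod t 4 = 0 ∨ PySem.Int.mod t 4 = 1 ∨
        PySem.Int.mod t 4 = 2 ∨ PySem.Int.mod t 4 = 3 := by omega
    by_cases h1 : u = "LEVO"
    · subst h1
      rcases h4 with h | h | h | h
      · have h' : PySem.Int.mod (t - 1) 4 = 3 := by rw [hmod] at h ⊢; omega
        have hb := ih (t - 1) x y pot
        rw [h'] at hb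
        rw [h]
        simpa [pvALoop, pvStage1, pvSmer] using hb
      · have h' : PySem.Int.mod (t - 1) 4 = 0 := by rw [hmod] at h ⊢; omega
        have hb := ih (t - 1) x y pot
        rw [h'] at hb
        rw [h]
        simpa [pvALoop, pvStage1, pvSmer] using hb
      · have h' : PySem.Int.mod (t - 1) 4 = 1 := by rw [hmod] at h ⊢; omega
        have hb := ih (t - 1) x y pot
        rw [h'] at hb
        rw [h]
        simpa [pvALoop, pvStage1, pvSmer] using hb
      · have h' : PySem.Int.mod (t - 1) 4 = 2 := by rw [hmod] at h ⊢; omega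
        have hb := ih (t - 1) x y pot
        rw [h'] at hb
        rw [h]
        simpa [pvALoop, pvStage1, pvSmer] using hb
    · by_cases h2 : u = "DESNO"
      · subst h2
        rcases h4 with h | h | h | h
        · have h' : PySem.Int.mod (t + 1) 4 = 1 := by rw [hmod] at h ⊢; omega
          have hb := ih (t + 1) x y pot
          rw [h'] at hb
          rw [h]
          simpa [pvALoop, pvStage1, pvSmer] using hb
        · have h' : PySem.Int.mod (t + 1) 4 = 2 := by rw [hmod] at h ⊢; omega
          have hb := ih (t + 1) x y pot
          rw [h'] at hb
          rw [h]
          simpa [pvALoop, pvStage1, pvSmer] using hb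
        · have h' : PySem.Int.mod (t + 1) 4 = 3 := by rw [hmod] at h ⊢; omega
          have hb := ih (t + 1) x y pot
          rw [h'] at hb
          rw [h]
          simpa [pvALoop, pvStage1, pvSmer] using hb
        · have h' : PySem.Int.mod (t + 1) 4 = 0 := by rw [hmod] at h ⊢; omega
          have hb := ih (t + 1) x y pot
          rw [h'] at hb
          rw [h]
          simpa [pvALoop, pvStage1, pvSmer] using hb
      · rcases h4 with h | h | h | h
        · have hb := ih t x (y - (PySem.Int.ofStr? u).getD 0)
            (pot ++ [(x, y - (PySem.Int.ofStr? u).getD 0)])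
          rw [h] at hb
          rw [h]
          have h' : t % 4 = 0 := by rw [hmod] at h; omega
          simpa [h', pvALoop, pvStage1, pvStage2, pvSmer, pvDirs,
            PySem.List.pyGet?, PySem.List.pyIdx?, h1, h2, sub_eq_add_neg] using hb
        · have hb := ih t (x + (PySem.Int.ofStr? u).getD 0) y
            (pot ++ [(x + (PySem.Int.ofStr? u).getD 0, y)])
          rw [h] at hb
          rw [h]
          have h' : t % 4 = 1 := by rw [hmod] at h; omega
          simpa [h', pvALoop, pvStage1, pvStage2, pvSmer, pvDirs,
            PySem.List.pyGet?, PySem.List.pyIdx?, h1, h2] using hb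
        · have hb := ih t x (y + (PySem.Int.ofStr? u).getD 0)
            (pot ++ [(x, y + (PySem.Int.ofStr? u).getD 0)])
          rw [h] at hb
          rw [h]
          have h' : t % 4 = 2 := by rw [hmod] at h; omega
          simpa [h', pvALoop, pvStage1, pvStage2, pvSmer, pvDirs,
            PySem.List.pyGet?, PySem.List.pyIdx?, h1, h2] using hb
        · have hb := ih t (x - (PySem.Int.ofStr? u).getD 0) y
            (pot ++ [(x - (PySem.Int.ofStr? u).getD 0, y)])
          rw [h] at hb
          rw [h]
          have h' : t % 4 = 3 := by rw [hmod] at h; omega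
          simpa [h', pvALoop, pvStage1, pvStage2, pvSmer, pvDirs,
            PySem.List.pyGet?, PySem.List.pyIdx?, h1, h2, sub_eq_add_neg] using hb

theorem preberi_pot_spec : Claim_equal_preberi_pot := by
  intro ukazi _ _
  unfold Spec_preberi_pot preberi_pot preberi_pot_alt
  have h := pvLoop_eq ((PySem.Str.split? ukazi "\n").getD []) 0 0 0 [(0, 0)]
  simpa [pvSmer, PySem.Int.mod] using h
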